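-- pv_equiv track=rewrite | github.com/Chaitra1817/CodingSolutions | 1235.MximumProfitInJobSearching.py | findNextJob
-- ===== SOURCE A (Python) =====
-- def findNextJob(currentIdx, jobs):
--     startTime = jobs[currentIdx][1]
--     left, right = currentIdx + 1, len(jobs) - 1
--
--     while left <= right:
--         mid = (left + right) // 2
--         if jobs[mid][0] >= startTime:
--             right = mid - 1
--         else:
--             left = mid + 1
--
--     if left < len(jobs):
--         return left
--     else:
--         return None
-- ===== SOURCE B (Python) =====
-- def findNextJob(currentIdx, jobs):
--     startTime = jobs[currentIdx][1]
--
--     def search(lo, n):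
--         # lower-bound search over the n-element window starting at lo,
--         # maintained as (start, count) instead of (left, right)
--         if n <= 0:
--             return lo
--         step = (n - 1) // 2
--         if jobs[lo + step][0] >= startTime:
--             return search(lo, step)
--         return search(lo + step + 1, n - step - 1)
--
--     pos = search(currentIdx + 1, len(jobs) - currentIdx - 1)
--     return pos if pos < len(jobs) else None
-- ===== Notes on version B (the rewrite author's own statement) =====
-- stated objective: alternative
-- what changed: The iterative (left,right) two-bound binary-search loop is replaced by a recursive divide-and-conquer helper that maintains (window start, window count) C++-lower_bound style; it probes the same indices in the same order, so it agrees even on unsorted input.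
-- outside the precondition, e.g. on findNextJob(0, []): A raises IndexError, B raises IndexError
import Mathlib
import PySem

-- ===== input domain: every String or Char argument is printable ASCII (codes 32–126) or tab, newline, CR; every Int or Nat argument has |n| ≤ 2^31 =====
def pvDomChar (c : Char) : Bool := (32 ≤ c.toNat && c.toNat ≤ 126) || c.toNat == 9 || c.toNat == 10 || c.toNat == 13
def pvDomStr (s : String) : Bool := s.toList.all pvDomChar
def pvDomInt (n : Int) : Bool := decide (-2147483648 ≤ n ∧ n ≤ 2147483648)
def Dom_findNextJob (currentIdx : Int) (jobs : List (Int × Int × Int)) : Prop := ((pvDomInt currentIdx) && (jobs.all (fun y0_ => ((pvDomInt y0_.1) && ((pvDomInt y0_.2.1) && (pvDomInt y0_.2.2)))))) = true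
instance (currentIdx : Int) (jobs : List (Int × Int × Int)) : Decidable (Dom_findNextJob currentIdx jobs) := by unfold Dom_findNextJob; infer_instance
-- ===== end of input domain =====

-- B replaces the iterative (left, right) two-bound binary-search loop by a recursive
-- divide-and-conquer helper maintaining (window start, window count); same probe sequence.

-- ===== PORT A =====
-- the while-loop of A: state (left, right), returns the final `left`
def findNextJobLoop (jobs : List (Int × Int × Int)) (startTime : Int)
    (left right : Int) : Int :=
  if h : left ≤ right then
    let mid := PySem.Int.floordiv (left + right) 2
    if (PySem.List.pyGetD jobs mid (0, 0, 0)).1 ≥ startTime then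
      findNextJobLoop jobs startTime left (mid - 1)
    else
      findNextJobLoop jobs startTime (mid + 1) right
  else left
termination_by (right + 1 - left).toNat
decreasing_by
  · have := PySem.Int.floordiv_two_mid_bounds h
    omega
  · have := PySem.Int.floordiv_two_mid_bounds h
    omega

def findNextJob (currentIdx : Int) (jobs : List (Int × Int × Int)) : Option Int :=
  match PySem.List.pyGet? jobs currentIdx with
  | none => none   -- jobs[currentIdx] raises IndexError; excluded by Pre_
  | some job =>
    let startTime := job.2.1
    let left := findNextJobLoop jobs startTime (currentIdx + 1) ((jobs.length : Int) - 1)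
    if left < (jobs.length : Int) then some left else none

-- ===== PORT B =====
-- B's recursive helper: state (lo, n) = window start and window count
def findNextJobSearch (jobs : List (Int × Int × Int)) (startTime : Int)
    (lo n : Int) : Int :=
  if h : n ≤ 0 then lo
  else
    let step := PySem.Int.floordiv (n - 1) 2
    if (PySem.List.pyGetD jobs (lo + step) (0, 0, 0)).1 ≥ startTime then
      findNextJobSearch jobs startTime lo step
    else
      findNextJobSearch jobs startTime (lo + step + 1) (n - step - 1)
termination_by n.toNat
decreasing_by
  · have := PySem.Int.floordiv_two_mid_bounds (lo := 0) (hi := n - 1) (by omega)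
    simp only [zero_add] at this
    omega
  · have := PySem.Int.floordiv_two_mid_bounds (lo := 0) (hi := n - 1) (by omega)
    simp only [zero_add] at this
    omega

def findNextJob_alt (currentIdx : Int) (jobs : List (Int × Int × Int)) : Option Int :=
  match PySem.List.pyGet? jobs currentIdx with
  | none => none   -- jobs[currentIdx] raises IndexError; excluded by Pre_
  | some job =>
    let startTime := job.2.1
    let pos := findNextJobSearch jobs startTime (currentIdx + 1)
                 ((jobs.length : Int) - currentIdx - 1)
    if pos < (jobs.length : Int) then some pos else none

-- ===== PRECONDITION & SPEC =====
-- Pre_ excludes exactly the inputs on which jobs[currentIdx] raises IndexError in A.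
def Pre_findNextJob (currentIdx : Int) (jobs : List (Int × Int × Int)) : Prop :=
  PySem.Raise.InRange jobs.length currentIdx
instance (currentIdx : Int) (jobs : List (Int × Int × Int)) : Decidable (Pre_findNextJob currentIdx jobs) := by unfold Pre_findNextJob; infer_instance
def pvWitness_findNextJob : Int × (List (Int × Int × Int)) := (0, [(1, 2, 50), (3, 4, 60)])

def Spec_findNextJob (currentIdx : Int) (jobs : List (Int × Int × Int)) (out : Option Int) : Prop := out = findNextJob_alt currentIdx jobs
instance (currentIdx : Int) (jobs : List (Int × Int × Int)) (out : Option Int) : Decidable (Spec_findNextJob currentIdx jobs out) := by unfold Spec_findNextJob; infer_instance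

-- ===== CLAIM (what is proved, stated in full; the proofs are below) =====
def Claim_equal_findNextJob : Prop := ∀ (currentIdx : Int) (jobs : List (Int × Int × Int)), Dom_findNextJob currentIdx jobs → Pre_findNextJob currentIdx jobs → Spec_findNextJob currentIdx jobs (findNextJob currentIdx jobs)

-- ===== LEMMAS AND PROOFS =====

-- The two helpers coincide under the change of state (left, right) ↦ (left, right + 1 - left).
theorem loop_eq_search (jobs : List (Int × Int × Int)) (s left right : Int) :
    findNextJobLoop jobs s left right =
      findNextJobSearch jobs s left (right + 1 - left) := by
  generalize hk : (right + 1 - left).toNat = k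
  induction k using Nat.strong_induction_on generalizing left right with
  | _ k ih =>
    rw [findNextJobLoop, findNextJobSearch]
    by_cases h : left ≤ right
    · have hn : ¬ right + 1 - left ≤ 0 := by omega
      simp only [h, dif_pos, hn, dif_neg, not_false_iff]
      have hmid : PySem.Int.floordiv (left + right) 2 =
          left + PySem.Int.floordiv (right + 1 - left - 1) 2 := by
        rw [PySem.Int.floordiv_eq_ediv_of_pos (by omega),
            PySem.Int.floordiv_eq_ediv_of_pos (by omega)]
        omega
      rw [hmid]
      set step := PySem.Int.floordiv (right + 1 - left - 1) 2 with hstep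
      have hb := PySem.Int.floordiv_two_mid_bounds (lo := 0) (hi := right + 1 - left - 1) (by omega)
      simp only [zero_add] at hb
      rw [← hstep] at hb
      split
      · rw [ih ((left + step - 1) + 1 - left).toNat (by omega) left (left + step - 1) rfl]
        congr 1; omega
      · rw [ih (right + 1 - (left + step + 1)).toNat (by omega) (left + step + 1) right rfl]
        congr 1; omega
    · have hn : right + 1 - left ≤ 0 := by omega
      simp [h, hn]

-- ===== VERDICT (by name: the statement is the Claim_ definition above) =====
theorem findNextJob_spec : Claim_equal_findNextJob := by
  intro currentIdx jobs _ _
  unfold Spec_findNextJob findNextJob findNextJob_alt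
  cases PySem.List.pyGet? jobs currentIdx with
  | none => rfl
  | some job =>
    simp only
    rw [loop_eq_search]
    have h : (jobs.length : Int) - 1 + 1 - (currentIdx + 1) = (jobs.length : Int) - currentIdx - 1 := by omega
    rw [h]
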